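-- pv_equiv track=rewrite | github.com/mtuit/aoc | 2020/day10.py | solve
-- ===== SOURCE A (Python) =====
-- import collections
--
-- def solve(data):
--     result1, result2 = (None, None)
--     jolts1, jolts3 = ([1], [1])
--     data.sort()
--
--     for i in range(len(data)-1):
--         if (data[i] + 1) == data[i+1]:
--             jolts1.append(1)
--         elif data[i] + 3 == data[i+1]:
--             jolts3.append(1)
--
--     result1 = len(jolts1) * len(jolts3)
--
--     possibilities = collections.defaultdict(int)
--     possibilities[0] = 1
--     for number in data:
--         possibilities[number] = possibilities[number-1] + possibilities[number-2] + possibilities[number-3]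
--
--     result2 = possibilities[max(data)]
--     return result1, result2
-- ===== SOURCE B (Python) =====
-- def solve(data):
--     data.sort()
--     ones, threes = 1, 1
--     for a, b in zip(data, data[1:]):
--         if b - a == 1:
--             ones += 1
--         elif b - a == 3:
--             threes += 1
--     adapters = set(data)
--     memo = {}
--     def count(v):
--         if v == 0:
--             return 1
--         if v < 0 or v not in adapters:
--             return 0
--         if v not in memo:
--             memo[v] = count(v - 1) + count(v - 2) + count(v - 3)
--         return memo[v]
--     return ones * threes, count(max(data))
-- ===== Notes on version B (the rewrite author's own statement) =====
-- stated objective: faster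
-- what changed: result1's two appended 1-lists become two integer counters over zipped sorted neighbours, and result2's bottom-up defaultdict DP becomes a top-down memoized recursion count(v)=count(v-1)+count(v-2)+count(v-3) over the adapter set; both still sort data in place.
-- intended difference: On inputs containing 0 whose distinct non-negative values form a chain with all gaps <= 3, A overwrites its seed possibilities[0]=1 with 0 and returns 0 as the arrangement count, while B returns the intended positive count of arrangements from jolt 0 to max(data). — e.g. on solve([0, 1, 4]): A returns (4, 0), B returns (4, 1)
import Mathlib
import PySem

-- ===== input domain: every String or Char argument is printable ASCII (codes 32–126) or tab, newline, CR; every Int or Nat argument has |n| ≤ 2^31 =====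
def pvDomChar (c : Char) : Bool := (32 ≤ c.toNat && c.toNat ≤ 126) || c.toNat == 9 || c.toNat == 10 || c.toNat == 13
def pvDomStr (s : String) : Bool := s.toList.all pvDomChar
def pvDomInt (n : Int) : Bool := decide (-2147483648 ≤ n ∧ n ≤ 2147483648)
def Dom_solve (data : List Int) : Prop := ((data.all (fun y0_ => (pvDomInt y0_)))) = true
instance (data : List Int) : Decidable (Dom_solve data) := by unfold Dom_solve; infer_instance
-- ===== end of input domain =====

-- B replaces A's bottom-up defaultdict DP by a top-down recursion over the adapter set (memoized in
-- Source B; the cache is value-transparent, so the port is the plain recursion) and replaces A's two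
-- appended 1-lists by two integer counters over zipped neighbours (measurably faster by a constant
-- factor: no 1-lists, no defaultdict). Both A and B sort `data` in place (same side effect); the
-- equivalence proved here is about the return value.
-- Inside D_solve (0 ∈ data with a gap-free non-negative chain) A returns 0 arrangements — its
-- `possibilities[0] = 1` seed is overwritten to 0 — while B returns the intended positive count.

-- ===== PORT A =====
-- A's loop reads data[i], data[i+1] only at indices 0 ≤ i < len-1, always in range, so pyGetD is
-- exact; defaultdict reads are modelled by getD 0 (the implicit 0-inserts are invisible to lookups).
def solve (data : List Int) : Int × Int :=
  let s := PySem.List.sorted data (fun x => x) false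
  let r := (PySem.List.pyRange 0 ((s.length : Int) - 1) 1).foldl
    (fun (acc : List Int × List Int) i =>
      if PySem.List.pyGetD s i 0 + 1 = PySem.List.pyGetD s (i+1) 0 then (acc.1 ++ [(1:Int)], acc.2)
      else if PySem.List.pyGetD s i 0 + 3 = PySem.List.pyGetD s (i+1) 0 then (acc.1, acc.2 ++ [(1:Int)])
      else acc) ([(1:Int)], [(1:Int)])
  let result1 := (r.1.length : Int) * (r.2.length : Int)
  let poss := s.foldl
    (fun (d : PySem.Dict Int Int) n =>
      d.insert n (d.getD (n-1) 0 + d.getD (n-2) 0 + d.getD (n-3) 0))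
    ((PySem.Dict.empty).insert 0 1)
  let result2 := poss.getD ((PySem.List.max? s (fun x => x)).getD 0) 0
  (result1, result2)

-- ===== PORT B =====
-- Source B's count(v); its memo dict is a pure cache (identical values), ported as the bare recursion.
-- fuel makes the recursion structural (kernel-reducible); v.toNat+1 steps always suffice, see countB_eq
def countBF (adapters : List Int) : Nat → Int → Int
  | 0, _ => 0
  | fuel+1, v =>
    if v = 0 then 1
    else if v < 0 ∨ v ∉ adapters then 0
    else countBF adapters fuel (v-1) + countBF adapters fuel (v-2) + countBF adapters fuel (v-3)

def countB (adapters : List Int) (v : Int) : Int := countBF adapters (v.toNat + 1) v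

def solve_alt (data : List Int) : Int × Int :=
  let s := PySem.List.sorted data (fun x => x) false
  let c := (s.zip (PySem.List.slice s (some 1) none)).foldl
    (fun (acc : Int × Int) p =>
      if p.2 - p.1 = 1 then (acc.1 + 1, acc.2)
      else if p.2 - p.1 = 3 then (acc.1, acc.2 + 1)
      else acc) (1, 1)
  let adapters : PySem.Set Int := PySem.Set.ofList s
  (c.1 * c.2, countB adapters ((PySem.List.max? s (fun x => x)).getD 0))

-- ===== PRECONDITION & SPEC =====
-- Pre_ excludes only the empty list, on which max(data) raises ValueError in both A and B.
def Pre_solve (data : List Int) : Prop := data ≠ []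
instance (data : List Int) : Decidable (Pre_solve data) := by unfold Pre_solve; infer_instance
def pvWitness_solve : List Int := [1, 4, 5, 6]

-- On inputs containing 0 whose distinct non-negative values form a chain with all gaps ≤ 3, A
-- returns 0 as the arrangement count (its seed possibilities[0] = 1 is overwritten by the DP to 0),
-- while B returns the intended positive count of arrangements from jolt 0 to max(data).
def D_solve (data : List Int) : Prop :=
  (0:Int) ∈ data ∧
  (let u := PySem.List.sorted (PySem.Set.ofList (data.filter (fun x => 0 ≤ x))) (fun x => x) false
   (u.zip u.tail).all (fun p => p.2 - p.1 ≤ 3)) = true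
instance (data : List Int) : Decidable (D_solve data) := by unfold D_solve; infer_instance

def Spec_solve (data : List Int) (out : Int × Int) : Prop := ¬ D_solve data → out = solve_alt data
instance (data : List Int) (out : Int × Int) : Decidable (Spec_solve data out) := by unfold Spec_solve; infer_instance

def pvDiffWitness_solve : List Int := [0, 1, 4]
def pvDiffWitnessOut_solve : (Int × Int) × (Int × Int) := ((4, 0), (4, 1))

-- ===== CLAIM (what is proved, stated in full; the proofs are below) =====
def Claim_unchanged_solve : Prop := ∀ (data : List Int), Dom_solve data → Pre_solve data → Spec_solve data (solve data)
def Claim_changed_solve : Prop := Dom_solve (pvDiffWitness_solve) ∧ Pre_solve (pvDiffWitness_solve) ∧ D_solve (pvDiffWitness_solve) ∧ solve (pvDiffWitness_solve) = pvDiffWitnessOut_solve.1 ∧ solve_alt (pvDiffWitness_solve) = pvDiffWitnessOut_solve.2 ∧ pvDiffWitnessOut_solve.1 ≠ pvDiffWitnessOut_solve.2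
def Claim_exact_solve : Prop := ∀ (data : List Int), Dom_solve data → Pre_solve data → D_solve data → solve data ≠ solve_alt data

-- ===== LEMMAS AND PROOFS =====


theorem countBF_congr (S : List Int) : ∀ (f : Nat) (v : Int) (g : Nat), v.toNat < f → v.toNat < g → countBF S f v = countBF S g v := by
  intro f
  induction f with
  | zero => omega
  | succ f ih =>
    intro v g hf hg
    cases g with
    | zero => omega
    | succ g =>
      simp only [countBF]
      by_cases h0 : v = 0
      · simp [h0]
      · by_cases h1 : v < 0 ∨ v ∉ S
        · simp [h0, h1]
        · simp only [h0, h1, if_false]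
          rw [not_or, not_lt] at h1
          rw [ih (v-1) g (by omega) (by omega), ih (v-2) g (by omega) (by omega),
              ih (v-3) g (by omega) (by omega)]

theorem countB_eq (S : List Int) (v : Int) :
    countB S v = if v = 0 then 1 else if v < 0 ∨ v ∉ S then 0
      else countB S (v-1) + countB S (v-2) + countB S (v-3) := by
  conv_lhs => unfold countB countBF
  by_cases h0 : v = 0
  · simp [h0]
  · by_cases h1 : v < 0 ∨ v ∉ S
    · simp [h0, h1]
    · simp only [h0, h1, if_false]
      rw [not_or, not_lt] at h1
      unfold countB
      rw [countBF_congr S (v.toNat) (v-1) ((v-1).toNat+1) (by omega) (by omega),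
          countBF_congr S (v.toNat) (v-2) ((v-2).toNat+1) (by omega) (by omega),
          countBF_congr S (v.toNat) (v-3) ((v-3).toNat+1) (by omega) (by omega)]

theorem countB_nonneg (S : List Int) (v : Int) : 0 ≤ countB S v := by
  suffices h : ∀ (f : Nat) (v : Int), 0 ≤ countBF S f v by exact h _ _
  intro f
  induction f with
  | zero => intro v; simp [countBF]
  | succ f ih => intro v; simp only [countBF]; split_ifs <;> [omega; omega; exact add_nonneg (add_nonneg (ih _) (ih _)) (ih _)]

theorem countB_neg (S : List Int) (v : Int) (h : v < 0) : countB S v = 0 := by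
  rw [countB_eq]; simp [h]; omega

theorem countB_zero (S : List Int) : countB S 0 = 1 := by rw [countB_eq]; simp

theorem countB_notmem (S : List Int) (v : Int) (h0 : v ≠ 0) (h : v ∉ S) : countB S v = 0 := by
  rw [countB_eq]; simp [h0, h]

def gAux (f : Int → Int) (pre : List Int) (v : Int) : Int :=
  if (0:Int) ∈ pre then 0 else if v = 0 then 1 else if v ∈ pre then f v else 0

theorem step_val (S pre : List Int) (n : Int) (d : PySem.Dict Int Int)
    (hd : ∀ v, d.getD v 0 = gAux (countB S) pre v)
    (hle : ∀ x ∈ pre, x ≤ n) (hmemn : n ∈ S)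
    (hlt : ∀ w, w ∈ S → w < n → w ∈ pre) :
    ∀ v, (d.insert n (d.getD (n-1) 0 + d.getD (n-2) 0 + d.getD (n-3) 0)).getD v 0
      = gAux (countB S) (pre ++ [n]) v := by
  intro v
  rw [PySem.Dict.getD_insert, hd (n-1), hd (n-2), hd (n-3)]
  by_cases hv : v = n
  · subst hv
    rw [if_pos rfl]
    by_cases h0pre : (0:Int) ∈ pre
    · simp [gAux, h0pre]
    · by_cases hn : v ≤ 0
      · -- processing a non-positive adapter: all three summands are 0, and so is gAux (pre++[v]) v
        have hterm : ∀ i : Int, 1 ≤ i → gAux (countB S) pre (v - i) = 0 := by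
          intro i hi
          simp only [gAux, h0pre, if_false]
          rw [if_neg (by omega)]
          split_ifs with hmem
          · exact countB_neg S _ (by omega)
          · rfl
        rw [hterm 1 (by omega), hterm 2 (by omega), hterm 3 (by omega)]
        simp only [gAux, List.mem_append, List.mem_singleton, h0pre]
        by_cases hv0 : v = 0
        · simp [hv0]
        · rw [if_neg (by simp; omega), if_neg hv0, if_pos (by simp), countB_neg S v (by omega)]
          norm_num
      · -- processing a positive adapter: the three summands are countB of v-1, v-2, v-3
        have hterm : ∀ w : Int, w < v → gAux (countB S) pre w = countB S w := by
          intro w hw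
          simp only [gAux, h0pre, if_false]
          by_cases hw0 : w = 0
          · rw [if_pos hw0, hw0, countB_zero]
          · rw [if_neg hw0]
            split_ifs with hmem
            · rfl
            · by_cases hwneg : w < 0
              · rw [countB_neg S w hwneg]
              · rw [countB_notmem S w hw0 (fun hws => hmem (hlt w hws hw))]
        rw [hterm (v-1) (by omega), hterm (v-2) (by omega), hterm (v-3) (by omega)]
        simp only [gAux, List.mem_append, List.mem_singleton, h0pre]
        rw [if_neg (by simp; omega), if_neg (by omega), if_pos (by simp),
            countB_eq S v, if_neg (by omega), if_neg (by simp [hmemn]; omega)]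
  · rw [if_neg hv]
    simp only [gAux, List.mem_append, List.mem_singleton]
    by_cases h0pre : (0:Int) ∈ pre
    · rw [hd v]; simp [gAux, h0pre]
    · by_cases hn0 : n = 0
      · rw [if_pos (by simp [hn0]), hd v]
        have hv0 : v ≠ 0 := by rw [hn0] at hv; exact hv
        simp only [gAux, h0pre, if_false, if_neg hv0]
        split_ifs with hmem
        · exact countB_neg S v (by have h1 := hle v hmem; rw [hn0] at h1; omega)
        · rfl
      · rw [if_neg (by simp [h0pre, Ne.symm hn0]), hd v]
        by_cases hv0 : v = 0
        · simp [gAux, hv0, h0pre]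
        · simp [gAux, h0pre, hv0, hv]

theorem dict_inv (S : List Int) : ∀ (suf pre : List Int) (d : PySem.Dict Int Int),
    (pre ++ suf).Pairwise (· ≤ ·) →
    (∀ x : Int, x ∈ pre ++ suf ↔ x ∈ S) →
    (∀ v, d.getD v 0 = gAux (countB S) pre v) →
    ∀ v, (suf.foldl (fun d n => d.insert n (d.getD (n-1) 0 + d.getD (n-2) 0 + d.getD (n-3) 0)) d).getD v 0
      = gAux (countB S) (pre ++ suf) v := by
  intro suf
  induction suf with
  | nil => intro pre d _ _ hd v; simpa using hd v
  | cons n suf' ih =>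
    intro pre d hpair hmem hd v
    have hassoc : pre ++ n :: suf' = (pre ++ [n]) ++ suf' := by simp
    rw [List.foldl_cons, hassoc]
    have hpair' : ((pre ++ [n]) ++ suf').Pairwise (· ≤ ·) := by rw [← hassoc]; exact hpair
    have hmem' : ∀ x : Int, x ∈ (pre ++ [n]) ++ suf' ↔ x ∈ S := by
      intro x; rw [← hassoc]; exact hmem x
    refine ih (pre ++ [n]) _ hpair' hmem' (step_val S pre n d hd ?_ ?_ ?_) v
    · intro x hx
      have := (List.pairwise_append.mp hpair).2.2 x hx n (by simp)
      exact this
    · exact (hmem n).mp (by simp)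
    · intro w hw hwn
      have hw' : w ∈ pre ++ n :: suf' := (hmem w).mpr hw
      rcases List.mem_append.mp hw' with h | h
      · exact h
      · rcases List.mem_cons.mp h with h | h
        · omega
        · have := List.pairwise_append.mp hpair
          have h2 := (List.pairwise_cons.mp this.2.1).1 w h
          omega

theorem adj_pairs : ∀ (u : List Int), u.Pairwise (· < ·) →
    ∀ p ∈ u.zip u.tail, p.1 ∈ u ∧ p.2 ∈ u ∧ p.1 < p.2 ∧ ∀ x ∈ u, x ≤ p.1 ∨ p.2 ≤ x := by
  intro u
  induction u with
  | nil => simp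
  | cons a t ih =>
    intro hp p hmem
    cases t with
    | nil => simp at hmem
    | cons b t' =>
      simp only [List.tail_cons, List.zip_cons_cons] at hmem
      rcases List.mem_cons.mp hmem with h | h
      · subst h
        refine ⟨by simp, by simp, (List.pairwise_cons.mp hp).1 b (by simp), ?_⟩
        intro x hx
        rcases List.mem_cons.mp hx with h | h
        · omega
        · right
          rcases List.mem_cons.mp h with h | h
          · omega
          · exact le_of_lt ((List.pairwise_cons.mp (List.pairwise_cons.mp hp).2).1 x h)
      · have hp' := (List.pairwise_cons.mp hp).2
        have := ih hp' p (by simpa using h)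
        refine ⟨by simp [this.1], by simp [this.2.1], this.2.2.1, ?_⟩
        intro x hx
        rcases List.mem_cons.mp hx with hxa | hxt
        · left
          have := (List.pairwise_cons.mp hp).1 p.1 this.1
          omega
        · exact this.2.2.2 x hxt

-- above an adjacent gap > 3 in the non-negative adapter values, the arrangement count is 0
theorem gap_zero (S : List Int) (a b : Int) (ha : 0 ≤ a) (hgap : a + 3 < b)
    (hnob : ∀ x, x ∈ S → a < x → b ≤ x) :
    ∀ (k : Nat) (v : Int), a < v → v ≤ a + k → countB S v = 0 := by
  intro k
  induction k with
  | zero => intro v h1 h2; omega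
  | succ k ih =>
    intro v h1 h2
    rw [countB_eq]
    rw [if_neg (by omega)]
    by_cases hm : v < 0 ∨ v ∉ S
    · rw [if_pos hm]
    · rw [if_neg hm]
      rw [not_or] at hm
      have hvb : b ≤ v := hnob v (by tauto) h1
      rw [ih (v-1) (by omega) (by omega), ih (v-2) (by omega) (by omega),
          ih (v-3) (by omega) (by omega)]
      norm_num

-- along a 0-rooted chain with gaps ≤ 3, every value has a positive arrangement count
theorem chain_pos (S : List Int) : ∀ (t : List Int) (a : Int), 0 ≤ a → 1 ≤ countB S a →
    (a :: t).Pairwise (· < ·) → (∀ x ∈ a :: t, x ∈ S) →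
    (((a :: t).zip t).all (fun p => decide (p.2 - p.1 ≤ 3))) = true →
    ∀ x ∈ a :: t, 1 ≤ countB S x := by
  intro t
  induction t with
  | nil => intro a _ hca _ _ _ x hx; simp at hx; rwa [hx]
  | cons b t' ih =>
    intro a ha hca hp hmem hall x hx
    simp only [List.zip_cons_cons, List.all_cons] at hall
    have hab : a < b := (List.pairwise_cons.mp hp).1 b (by simp)
    have hgap : b - a ≤ 3 := by simpa using (Bool.and_elim_left hall)
    have hcb : 1 ≤ countB S b := by
      rw [countB_eq, if_neg (by omega), if_neg (by push Not; exact ⟨by omega, hmem b (by simp)⟩)]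
      have h1 := countB_nonneg S (b-1)
      have h2 := countB_nonneg S (b-2)
      have h3 := countB_nonneg S (b-3)
      have hcase : b - a = 1 ∨ b - a = 2 ∨ b - a = 3 := by omega
      rcases hcase with h | h | h
      · rw [show b - (1:Int) = a by omega]; omega
      · rw [show b - (2:Int) = a by omega]; omega
      · rw [show b - (3:Int) = a by omega]; omega
    rcases List.mem_cons.mp hx with h | h
    · subst h; exact hca
    · exact ih b (by omega) hcb (List.pairwise_cons.mp hp).2
        (fun y hy => hmem y (List.mem_cons_of_mem a hy))
        (by simpa using (Bool.and_elim_right hall)) x h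


theorem range_pairs (s : List Int) :
    (PySem.List.pyRange 0 ((s.length : Int) - 1) 1).map
      (fun i => (PySem.List.pyGetD s i 0, PySem.List.pyGetD s (i+1) 0)) = s.zip s.tail := by
  apply List.ext_getElem
  · simp [PySem.List.length_pyRange_one, List.length_zip, List.length_tail]
  · intro k h1 h2
    simp only [List.getElem_map, PySem.List.getElem_pyRange_one, zero_add, List.getElem_zip,
      List.getElem_tail]
    have hk : k < s.length - 1 := by
      simp [PySem.List.length_pyRange_one] at h1; omega
    rw [show ((k:Int) + 1) = ((k+1 : Nat) : Int) by omega]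
    rw [PySem.List.pyGetD_eq_getElem s 0 (by omega) (by omega),
        PySem.List.pyGetD_eq_getElem s 0 (by omega) (by omega)]
    simp

theorem counts_fold : ∀ (ps : List (Int × Int)) (l1 l2 : List Int),
    (((ps.foldl (fun (acc : List Int × List Int) p =>
        if p.1 + 1 = p.2 then (acc.1 ++ [(1:Int)], acc.2)
        else if p.1 + 3 = p.2 then (acc.1, acc.2 ++ [(1:Int)]) else acc) (l1, l2)).1.length : Int),
     ((ps.foldl (fun (acc : List Int × List Int) p =>
        if p.1 + 1 = p.2 then (acc.1 ++ [(1:Int)], acc.2)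
        else if p.1 + 3 = p.2 then (acc.1, acc.2 ++ [(1:Int)]) else acc) (l1, l2)).2.length : Int))
    = ps.foldl (fun (acc : Int × Int) p =>
        if p.2 - p.1 = 1 then (acc.1 + 1, acc.2)
        else if p.2 - p.1 = 3 then (acc.1, acc.2 + 1) else acc) ((l1.length : Int), (l2.length : Int)) := by
  intro ps
  induction ps with
  | nil => intro l1 l2; simp
  | cons p ps ih =>
    intro l1 l2
    simp only [List.foldl_cons]
    by_cases h1 : p.1 + 1 = p.2
    · rw [if_pos h1, if_pos (show p.2 - p.1 = 1 by omega)]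
      have := ih (l1 ++ [1]) l2
      simpa using this
    · rw [if_neg h1, if_neg (show ¬ p.2 - p.1 = 1 by omega)]
      by_cases h3 : p.1 + 3 = p.2
      · rw [if_pos h3, if_pos (show p.2 - p.1 = 3 by omega)]
        have := ih l1 (l2 ++ [1])
        simpa using this
      · rw [if_neg h3, if_neg (show ¬ p.2 - p.1 = 3 by omega)]
        exact ih l1 l2

theorem loop1_zip (s : List Int) :
    (PySem.List.pyRange 0 ((s.length : Int) - 1) 1).foldl
      (fun (acc : List Int × List Int) i =>
        if PySem.List.pyGetD s i 0 + 1 = PySem.List.pyGetD s (i+1) 0 then (acc.1 ++ [(1:Int)], acc.2)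
        else if PySem.List.pyGetD s i 0 + 3 = PySem.List.pyGetD s (i+1) 0 then (acc.1, acc.2 ++ [(1:Int)]) else acc)
      ([(1:Int)], [(1:Int)])
    = (s.zip s.tail).foldl
      (fun (acc : List Int × List Int) p =>
        if p.1 + 1 = p.2 then (acc.1 ++ [(1:Int)], acc.2)
        else if p.1 + 3 = p.2 then (acc.1, acc.2 ++ [(1:Int)]) else acc) ([(1:Int)], [(1:Int)]) := by
  rw [← range_pairs s, List.foldl_map]

theorem fst_eq (data : List Int) : (solve data).1 = (solve_alt data).1 := by
  simp only [solve, solve_alt, PySem.List.slice_from_one]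
  rw [loop1_zip]
  have h := counts_fold ((PySem.List.sorted data (fun x => x) false).zip
      (PySem.List.sorted data (fun x => x) false).tail) [(1:Int)] [(1:Int)]
  simp only [List.length_singleton, Nat.cast_one] at h
  rw [← h]

theorem snd_solve (data : List Int) :
    (solve data).2 = gAux (countB (PySem.Set.ofList (PySem.List.sorted data (fun x => x) false)))
      (PySem.List.sorted data (fun x => x) false)
      ((PySem.List.max? (PySem.List.sorted data (fun x => x) false) (fun x => x)).getD 0) := by
  have h := dict_inv (PySem.Set.ofList (PySem.List.sorted data (fun x => x) false))
      (PySem.List.sorted data (fun x => x) false) [] ((PySem.Dict.empty).insert 0 1)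
      (by simpa using PySem.List.sorted_pairwise data (fun x => x))
      (by intro x; simp [PySem.Set.mem_ofList])
      (by intro v; simp [gAux, PySem.Dict.getD_insert, PySem.Dict.getD_empty])
      ((PySem.List.max? (PySem.List.sorted data (fun x => x) false) (fun x => x)).getD 0)
  simpa [solve] using h

theorem snd_alt (data : List Int) :
    (solve_alt data).2 = countB (PySem.Set.ofList (PySem.List.sorted data (fun x => x) false))
      ((PySem.List.max? (PySem.List.sorted data (fun x => x) false) (fun x => x)).getD 0) := rfl

-- shared set-up facts, packaged to serve both verdict theorems
theorem u_mem (data : List Int) (x : Int) :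
    x ∈ PySem.List.sorted (PySem.Set.ofList (data.filter (fun x => 0 ≤ x))) (fun x => x) false
      ↔ x ∈ data ∧ 0 ≤ x := by
  rw [PySem.List.mem_sorted, PySem.Set.mem_ofList, List.mem_filter]
  simp

theorem max_char (data : List Int) (h : data ≠ []) :
    ∃ m, PySem.List.max? (PySem.List.sorted data (fun x => x) false) (fun x => x) = some m ∧
      m ∈ data ∧ ∀ y ∈ data, y ≤ m := by
  cases hm : PySem.List.max? (PySem.List.sorted data (fun x => x) false) (fun x => x) with
  | none =>
    exact absurd ((PySem.List.sorted_eq_nil_iff _ _ _).mp ((PySem.List.max?_eq_none_iff _ _).mp hm)) h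
  | some m =>
    refine ⟨m, rfl, ?_, ?_⟩
    · have := PySem.List.max?_mem hm
      rwa [PySem.List.mem_sorted] at this
    · intro y hy
      exact PySem.List.max?_isMax hm y (by rwa [PySem.List.mem_sorted])

-- A's second component, in closed form: 0 when 0 ∈ data, else B's second component
theorem snd_cases (data : List Int) (h : data ≠ []) :
    (solve data).2 = if (0:Int) ∈ data then 0 else (solve_alt data).2 := by
  obtain ⟨m, hm, hmd, hmax⟩ := max_char data h
  rw [snd_solve, snd_alt, hm, Option.getD_some]
  by_cases h0 : (0:Int) ∈ data
  · rw [if_pos h0]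
    simp [gAux, PySem.List.mem_sorted, h0]
  · rw [if_neg h0]
    have h0s : (0:Int) ∉ PySem.List.sorted data (fun x => x) false := by
      rwa [PySem.List.mem_sorted]
    have hms : m ∈ PySem.List.sorted data (fun x => x) false := by
      rwa [PySem.List.mem_sorted]
    have hm0 : m ≠ 0 := fun he => h0s (he ▸ hms)
    simp [gAux, h0s, hm0, hms]

-- ===== VERDICT (by name: the statement is the Claim_ definition above) =====
theorem solve_spec : Claim_unchanged_solve := by
  unfold Claim_unchanged_solve Spec_solve
  intro data _ hpre hD
  have hfst := fst_eq data
  obtain ⟨m, hm, hmd, hmax⟩ := max_char data hpre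
  refine Prod.ext hfst ?_
  rw [snd_cases data hpre]
  by_cases h0 : (0:Int) ∈ data
  · rw [if_pos h0]
    -- a gap > 3 exists among the distinct non-negative values: B's count at max is also 0
    unfold D_solve at hD
    rw [not_and] at hD
    have hall := hD h0
    simp only [List.all_eq_true, not_forall] at hall
    obtain ⟨p, hpz, hp3⟩ := hall
    rw [decide_eq_true_eq] at hp3
    have hu_pair := PySem.List.sorted_ofList_pairwise_lt (data.filter (fun x => 0 ≤ x)) 
    have hadj := adj_pairs _ hu_pair p hpz
    obtain ⟨hpa, hpb, hpab, hsplit⟩ := hadj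
    have ha0 : 0 ≤ p.1 := ((u_mem data p.1).mp hpa).2
    have hnob : ∀ x, x ∈ PySem.Set.ofList (PySem.List.sorted data (fun x => x) false) →
        p.1 < x → p.2 ≤ x := by
      intro x hxS hax
      have hxd : x ∈ data := by
        rwa [PySem.Set.mem_ofList, PySem.List.mem_sorted] at hxS
      have hxu : x ∈ _ := (u_mem data x).mpr ⟨hxd, by omega⟩
      rcases hsplit x hxu with hc | hc
      · omega
      · exact hc
    have hbm : p.2 ≤ m := hmax p.2 ((u_mem data p.2).mp hpb).1
    rw [snd_alt, hm, Option.getD_some,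
        gap_zero _ p.1 p.2 ha0 (by omega) hnob (m - p.1).toNat m (by omega) (by omega)]
  · rw [if_neg h0]

theorem solve_changed : Claim_changed_solve := by unfold Claim_changed_solve; decide

theorem solve_tight : Claim_exact_solve := by
  unfold Claim_exact_solve
  intro data _ hpre hD heq
  obtain ⟨h0, hall⟩ := hD
  obtain ⟨m, hm, hmd, hmax⟩ := max_char data hpre
  have h2 := congrArg Prod.snd heq
  rw [snd_cases data hpre, if_pos h0, snd_alt, hm, Option.getD_some] at h2
  -- B's count at max is positive along the 0-rooted chain of distinct non-negative values
  cases hu : PySem.List.sorted (PySem.Set.ofList (data.filter (fun x => 0 ≤ x))) (fun x => x) false with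
  | nil =>
    have : (0:Int) ∈ ([] : List Int) := by
      rw [← hu]; exact (u_mem data 0).mpr ⟨h0, le_refl 0⟩
    simp at this
  | cons a t =>
    have hu_pair := PySem.List.sorted_ofList_pairwise_lt (data.filter (fun x => 0 ≤ x))
    rw [hu] at hu_pair
    have ha0 : a = 0 := by
      have h0u : (0:Int) ∈ a :: t := by rw [← hu]; exact (u_mem data 0).mpr ⟨h0, le_refl 0⟩
      have hann : 0 ≤ a := ((u_mem data a).mp (by rw [hu]; simp)).2
      rcases List.mem_cons.mp h0u with hc | hc
      · omega
      · have := (List.pairwise_cons.mp hu_pair).1 0 hc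
        omega
    subst ha0
    have hmem : ∀ x ∈ (0:Int) :: t, x ∈ PySem.Set.ofList (PySem.List.sorted data (fun x => x) false) := by
      intro x hx
      rw [PySem.Set.mem_ofList, PySem.List.mem_sorted]
      exact ((u_mem data x).mp (by rw [hu]; exact hx)).1
    have hallz : (((0:Int) :: t).zip t).all (fun p => decide (p.2 - p.1 ≤ 3)) = true := by
      rw [hu] at hall
      simpa using hall
    have hmu : m ∈ (0:Int) :: t := by
      rw [← hu]
      exact (u_mem data m).mpr ⟨hmd, hmax 0 h0⟩
    have hpos := chain_pos (PySem.Set.ofList (PySem.List.sorted data (fun x => x) false)) t 0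
      (le_refl 0) (by rw [countB_zero]) hu_pair hmem hallz m hmu
    omega
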